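-- pv_equiv track=rewrite | github.com/21p31a0422/codemind-python | All_vowels_in_a_string.py | vow_str
-- ===== SOURCE A (Python) =====
-- def vow_str(s):
--     vowels, VOWELS, v, V = 'aeiou', 'AEIOU', [], []
--     for i in vowels:
--         if i in s:
--             v.append(i)
--     for i in VOWELS:
--         if i in s:
--             V.append(i)
--     if len(v) == 5 or len(V) == 5:
--         return True
--     return False
-- ===== SOURCE B (Python) =====
-- def vow_str(s):
--     seen = set(s)
--     return set('aeiou') <= seen or set('AEIOU') <= seen
-- ===== Notes on version B (the rewrite author's own statement) =====
-- stated objective: idiomatic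
-- what changed: A scans the string once per vowel (ten substring scans, appending to two lists); B makes one pass building set(s) and answers with two subset tests over the vowel sets.
import Mathlib
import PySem

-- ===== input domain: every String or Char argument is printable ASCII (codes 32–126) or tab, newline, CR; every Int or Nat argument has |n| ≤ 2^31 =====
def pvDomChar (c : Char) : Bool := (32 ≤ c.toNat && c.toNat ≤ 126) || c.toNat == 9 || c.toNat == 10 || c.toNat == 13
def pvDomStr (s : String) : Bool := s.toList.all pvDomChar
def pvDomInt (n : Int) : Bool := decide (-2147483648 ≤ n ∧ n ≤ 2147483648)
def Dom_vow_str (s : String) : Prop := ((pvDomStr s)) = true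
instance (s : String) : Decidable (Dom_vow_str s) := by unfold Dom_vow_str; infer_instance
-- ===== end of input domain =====

-- B replaces A's five substring scans per case with one pass building set(s) and two subset tests (idiomatic).


-- ===== PORT A =====
-- 'i in s' on strings is Python substring containment: PySem.Chars.isIn [i] s.toList (exact)
def vow_str (s : String) : Bool :=
  let vowels : List Char := ['a', 'e', 'i', 'o', 'u']
  let VOWELS : List Char := ['A', 'E', 'I', 'O', 'U']
  let v := vowels.foldl (fun acc i => if PySem.Chars.isIn [i] s.toList then acc ++ [i] else acc) ([] : List Char)
  let V := VOWELS.foldl (fun acc i => if PySem.Chars.isIn [i] s.toList then acc ++ [i] else acc) ([] : List Char)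
  if v.length == 5 || V.length == 5 then true else false

-- ===== PORT B =====
def vow_str_alt (s : String) : Bool :=
  let seen : PySem.Set Char := PySem.Set.ofList s.toList
  PySem.Set.issubset (PySem.Set.ofList ['a', 'e', 'i', 'o', 'u']) seen
    || PySem.Set.issubset (PySem.Set.ofList ['A', 'E', 'I', 'O', 'U']) seen

-- ===== PRECONDITION & SPEC =====
def Spec_vow_str (s : String) (out : Bool) : Prop := out = vow_str_alt s
instance (s : String) (out : Bool) : Decidable (Spec_vow_str s out) := by unfold Spec_vow_str; infer_instance

-- ===== CLAIM (what is proved, stated in full; the proofs are below) =====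
def Claim_equal_vow_str : Prop := ∀ (s : String), Dom_vow_str s → Spec_vow_str s (vow_str s)

-- ===== LEMMAS AND PROOFS =====

theorem isIn_singleton (c : Char) (l : List Char) :
    PySem.Chars.isIn [c] l = l.contains c := by
  cases hb : l.contains c
  · have : c ∉ l := by simpa using hb
    exact (PySem.Chars.isIn_eq_false_iff _ _).mpr (by
      simpa [List.singleton_infix_iff] using this)
  · have : c ∈ l := by simpa using hb
    exact (PySem.Chars.isIn_iff_infix _ _).mpr ((List.singleton_infix_iff _ _).mpr this)

theorem foldl_filter_gen (p : Char → Bool) (l acc : List Char) :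
    l.foldl (fun acc i => if p i then acc ++ [i] else acc) acc = acc ++ l.filter p := by
  induction l generalizing acc with
  | nil => simp
  | cons x xs ih => cases h : p x <;> simp [h, ih]

theorem vow_str_spec' (s : String) : vow_str s = vow_str_alt s := by
  have hlen : ∀ (vl : List Char), vl.length = 5 →
      (((vl.filter s.toList.contains).length = 5)
        ↔ ∀ i ∈ vl, i ∈ s.toList) := by
    intro vl h5
    rw [← h5, List.length_filter_eq_length_iff]
    simp
  unfold vow_str vow_str_alt
  simp only [foldl_filter_gen, List.nil_append, isIn_singleton]
  rw [Bool.eq_iff_iff]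
  simp [PySem.Set.issubset_iff, PySem.Set.mem_ofList, hlen]

-- ===== VERDICT (by name: the statement is the Claim_ definition above) =====
theorem vow_str_spec : Claim_equal_vow_str := by
  intro s _
  unfold Spec_vow_str
  exact vow_str_spec' s
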